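-- pv_equiv track=rewrite | github.com/holomorfo/welltrainedclusters | simplemir/structure.py | get_segments_n_voices
-- ===== SOURCE A (Python) =====
-- def get_segments_n_voices(orchestral_density_vector, voice_nums=1):
--     """
--     Finds the segments of n-active voices in the orchestral density vector.
--
--     Args:
--         orchestral_density_vector: vector of 1xm, m: numbero of measures
--             with an integer in each entry indicating the number of active
--             parts in that measure
--
--         voice_nums: segments with n number of active voices, for example
--             1: soloist, 2: duets, etc.
--
--     Returns:
--         segments: Vector of tupples indicating the range of measures with
--             n-voices. Example, the next vector indicates that from measures
--             4 to 6, 46 to 56 and 83 to 92 we have the correct number of voices.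
--             [(4, 6), (46, 56), (83, 92)]
--
--     Raises:
--
--
--     """
--     segments = []
--     vel = []
--     start = -1
--     end = -1
--     for i, e in enumerate(orchestral_density_vector):
--         if voice_nums == e:
--             vel.append(i)
--             if start == -1:
--                 start = i
--         else:
--             if start != -1:
--                 end = i-1
--                 segments.append((start, end))
--                 start = -1
--                 end = -1
--     if start != -1:
--         end = len(orchestral_density_vector)-1
--         segments.append((start, end))
--         start = -1
--         end = -1
--     return segments
-- ===== SOURCE B (Python) =====
-- def get_segments_n_voices(orchestral_density_vector, voice_nums=1):
--     # Two-pointer run scan: find each maximal run of equal values, emit it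
--     # as (start, end) when its value equals voice_nums, then jump past it.
--     v = orchestral_density_vector
--     n = len(v)
--     segments = []
--     i = 0
--     while i < n:
--         j = i + 1
--         while j < n and v[j] == v[i]:
--             j += 1
--         if v[i] == voice_nums:
--             segments.append((i, j - 1))
--         i = j
--     return segments
-- ===== Notes on version B (the rewrite author's own statement) =====
-- stated objective: alternative
-- what changed: Replaced A's per-element start/end sentinel state machine (with the dead 'vel' list and trailing-run flush) by a two-pointer scan over maximal runs of equal values that emits a segment per run whose value matches voice_nums.
import Mathlib
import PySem

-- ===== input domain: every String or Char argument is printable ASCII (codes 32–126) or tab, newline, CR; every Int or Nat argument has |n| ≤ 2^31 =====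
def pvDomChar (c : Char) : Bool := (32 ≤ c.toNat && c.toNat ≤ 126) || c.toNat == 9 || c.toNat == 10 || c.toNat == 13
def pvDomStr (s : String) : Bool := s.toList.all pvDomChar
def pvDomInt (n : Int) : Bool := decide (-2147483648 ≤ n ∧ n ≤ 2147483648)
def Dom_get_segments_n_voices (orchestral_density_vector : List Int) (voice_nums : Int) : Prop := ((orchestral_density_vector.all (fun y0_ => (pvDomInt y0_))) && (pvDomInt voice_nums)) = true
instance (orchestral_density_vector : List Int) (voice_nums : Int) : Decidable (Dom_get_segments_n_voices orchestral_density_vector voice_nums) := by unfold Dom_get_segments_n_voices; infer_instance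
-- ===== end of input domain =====

-- B replaces A's per-element sentinel state machine by a two-pointer scan over maximal runs (alternative decomposition, same cost).
-- A also builds a list 'vel' it never uses; it does not affect the return value and is dropped from the port's state.

-- ===== PORT A =====
-- the enumerate loop of A: carries (segments, start); 'end' and 'vel' never influence the result
def pvLoopA (vn : Int) : List Int → Int → (List (Int × Int) × Int) → (List (Int × Int) × Int)
  | [], _, st => st
  | e :: rest, i, (segments, start) =>
    if vn == e then
      pvLoopA vn rest (i + 1) (segments, if start == (-1 : Int) then i else start)
    else
      if start != (-1 : Int) then
        pvLoopA vn rest (i + 1) (segments ++ [(start, i - 1)], -1)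
      else
        pvLoopA vn rest (i + 1) (segments, start)

def get_segments_n_voices (orchestral_density_vector : List Int) (voice_nums : Int) : List (Int × Int) :=
  let st := pvLoopA voice_nums orchestral_density_vector 0 ([], -1)
  if st.2 != (-1 : Int) then st.1 ++ [(st.2, (orchestral_density_vector.length : Int) - 1)] else st.1

-- ===== PORT B =====
-- inner while loop of B: length of the leading run equal to x
def pvRunLen (x : Int) : List Int → Nat
  | [] => 0
  | z :: zs => if z == x then 1 + pvRunLen x zs else 0

-- outer while loop of B: one step per maximal run
def pvGoB (vn : Int) : List Int → Int → List (Int × Int)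
  | [], _ => []
  | x :: xs, i =>
    let k : Int := 1 + (pvRunLen x xs : Int)
    (if x == vn then [(i, i + k - 1)] else []) ++ pvGoB vn (xs.drop (pvRunLen x xs)) (i + k)
termination_by l => l.length
decreasing_by
  simp only [List.length_cons, List.length_drop]
  omega

def get_segments_n_voices_alt (orchestral_density_vector : List Int) (voice_nums : Int) : List (Int × Int) :=
  pvGoB voice_nums orchestral_density_vector 0

-- ===== PRECONDITION & SPEC =====
def Spec_get_segments_n_voices (orchestral_density_vector : List Int) (voice_nums : Int) (out : List (Int × Int)) : Prop := out = get_segments_n_voices_alt orchestral_density_vector voice_nums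
instance (orchestral_density_vector : List Int) (voice_nums : Int) (out : List (Int × Int)) : Decidable (Spec_get_segments_n_voices orchestral_density_vector voice_nums out) := by unfold Spec_get_segments_n_voices; infer_instance

-- ===== CLAIM (what is proved, stated in full; the proofs are below) =====
def Claim_equal_get_segments_n_voices : Prop := ∀ (orchestral_density_vector : List Int) (voice_nums : Int), Dom_get_segments_n_voices orchestral_density_vector voice_nums → Spec_get_segments_n_voices orchestral_density_vector voice_nums (get_segments_n_voices orchestral_density_vector voice_nums)

-- ===== LEMMAS AND PROOFS =====

-- A's final flush, abstracted over the end index used for a trailing run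
def pvFinish (L : Int) (st : List (Int × Int) × Int) : List (Int × Int) :=
  if st.2 != (-1 : Int) then st.1 ++ [(st.2, L - 1)] else st.1

-- skipping one non-matching element is absorbed by B's run grouping
theorem pvGoB_cons_ne (vn y : Int) (ys : List Int) (i : Int) (h : ¬ y = vn) :
    pvGoB vn (y :: ys) i = pvGoB vn ys (i + 1) := by
  cases ys with
  | nil => simp [pvGoB, pvRunLen, h]
  | cons z zs =>
    by_cases hz : z = y
    · subst hz
      rw [pvGoB, pvGoB]
      simp only [pvRunLen, beq_self_eq_true, if_true, beq_iff_eq, h, if_false,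
        List.nil_append]
      rw [Nat.add_comm 1 (pvRunLen z zs), List.drop_succ_cons]
      congr 1
      push_cast
      ring
    · conv_lhs => rw [pvGoB]
      simp only [pvRunLen, beq_iff_eq, hz, if_false, h, List.nil_append, List.drop_zero,
        Nat.cast_zero]
      norm_num

theorem pvMain (vn : Int) (rest : List Int) (i : Int) (segs : List (Int × Int)) (start : Int)
    (hi : 0 ≤ i) (hs : start = -1 ∨ 0 ≤ start) :
    pvFinish (i + rest.length) (pvLoopA vn rest i (segs, start)) =
      segs ++ (if start = -1 then pvGoB vn rest i
               else (start, i + (pvRunLen vn rest : Int) - 1) ::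
                    pvGoB vn (rest.drop (pvRunLen vn rest)) (i + (pvRunLen vn rest : Int))) := by
  induction rest generalizing i segs start with
  | nil =>
    rcases hs with h | h
    · subst h
      simp [pvLoopA, pvFinish, pvGoB]
    · have hne : ¬ start = (-1 : Int) := by omega
      simp [pvLoopA, pvFinish, pvGoB, pvRunLen, hne]
  | cons e es ih =>
    have hlen : i + ((e :: es).length : Int) = (i + 1) + (es.length : Int) := by
      simp only [List.length_cons]; push_cast; ring
    rw [hlen]
    by_cases he : vn = e
    · subst he
      rcases hs with h | h
      · subst h
        simp only [pvLoopA, beq_self_eq_true, if_true]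
        rw [ih (i + 1) segs i (by omega) (Or.inr hi)]
        have hne : ¬ i = (-1 : Int) := by omega
        simp only [if_neg hne]
        conv_rhs => rw [pvGoB]
        simp only [beq_self_eq_true, if_true, List.singleton_append]
        congr 2
        · congr 1; ring
        · congr 1; ring
      · have hne : ¬ start = (-1 : Int) := by omega
        simp only [pvLoopA, beq_self_eq_true, if_true]
        rw [if_neg (by simp [hne] : ¬ (start == (-1 : Int)) = true)]
        rw [ih (i + 1) segs start (by omega) (Or.inr h)]
        simp only [if_neg hne]
        have hr : pvRunLen vn (vn :: es) = 1 + pvRunLen vn es := by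
          simp [pvRunLen]
        rw [hr, Nat.add_comm 1 (pvRunLen vn es), List.drop_succ_cons]
        congr 2
        · congr 1; push_cast; ring
        · congr 1; push_cast; ring
    · have hee : (vn == e) = false := by simp [he]
      have hes : ¬ e = vn := fun hh => he hh.symm
      have hrl : pvRunLen vn (e :: es) = 0 := by simp [pvRunLen, hes]
      rw [pvLoopA]
      rw [if_neg (by simp [he] : ¬ (vn == e) = true)]
      rcases hs with h | h
      · subst h
        rw [if_neg (by simp : ¬ ((-1 : Int) != (-1 : Int)) = true)]
        rw [ih (i + 1) segs (-1) (by omega) (Or.inl rfl)]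
        rw [pvGoB_cons_ne vn e es i hes]
        simp
      · have hne : ¬ start = (-1 : Int) := by omega
        rw [if_pos (by simp [hne] : (start != (-1 : Int)) = true)]
        rw [ih (i + 1) (segs ++ [(start, i - 1)]) (-1) (by omega) (Or.inl rfl)]
        simp only [if_neg hne]
        rw [hrl]
        simp only [List.drop_zero, Nat.cast_zero, List.append_assoc, List.singleton_append,
          add_zero]
        rw [pvGoB_cons_ne vn e es i hes]
        simp

-- ===== VERDICT (by name: the statement is the Claim_ definition above) =====
theorem get_segments_n_voices_spec : Claim_equal_get_segments_n_voices := by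
  intro v vn _
  unfold Spec_get_segments_n_voices get_segments_n_voices get_segments_n_voices_alt
  have h := pvMain vn v 0 [] (-1) le_rfl (Or.inl rfl)
  simp only [if_true, List.nil_append, zero_add] at h
  simpa [pvFinish] using h
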